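-- pv_equiv track=rewrite | github.com/intzy/ProjectEuler | src/pb147.py | num_flush_diagonals_last_column
-- ===== SOURCE A (Python) =====
-- def num_flush_diagonals_last_column(base, height):
--     diag_base = 2 * base - 1
--     ans = 0
--     for i, h in enumerate(range(height - 1, 0, -1)):
--         i = min(2 * (i + 1), diag_base)
--         for b in range(i):
--             ans += min(2 * h, diag_base - b)
--     return ans
-- ===== SOURCE B (Python) =====
-- def num_flush_diagonals_last_column(base, height):
--     D = 2 * base - 1
--     ans = 0
--     i = 0
--     for h in range(height - 1, 0, -1):
--         w = min(2 * (i + 1), D)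
--         if w > 0:
--             k = min(max(D - 2 * h + 1, 0), w)
--             m = w - k
--             ans += 2 * h * k + m * (D - k) - m * (m - 1) // 2
--         i += 1
--     return ans
-- ===== Notes on version B (the rewrite author's own statement) =====
-- stated objective: faster
-- what changed: The inner loop summing min(2*h, diag_base - b) over b is replaced by a closed-form arithmetic-series formula split at the threshold where the cap 2*h stops binding; only the O(height) outer loop remains.
import Mathlib
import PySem

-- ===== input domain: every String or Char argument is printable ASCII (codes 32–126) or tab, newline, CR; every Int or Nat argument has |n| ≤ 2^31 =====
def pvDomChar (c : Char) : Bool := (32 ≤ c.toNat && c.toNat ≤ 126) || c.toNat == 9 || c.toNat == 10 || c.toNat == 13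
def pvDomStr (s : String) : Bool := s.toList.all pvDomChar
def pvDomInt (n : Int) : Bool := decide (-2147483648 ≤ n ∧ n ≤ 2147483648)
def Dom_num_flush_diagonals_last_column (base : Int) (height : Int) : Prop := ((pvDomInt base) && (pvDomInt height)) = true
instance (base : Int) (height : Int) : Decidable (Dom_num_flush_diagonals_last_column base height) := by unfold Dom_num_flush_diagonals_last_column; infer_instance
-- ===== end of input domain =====

-- B replaces A's inner min-sum loop by a closed-form arithmetic-series split at the threshold
-- (objective: faster, O(height) instead of O(height*base)); the outer loop over heights remains.


-- ===== PORT A =====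
def num_flush_diagonals_last_column (base : Int) (height : Int) : Int :=
  let diag_base := 2 * base - 1
  (PySem.List.enumerate (PySem.List.pyRange (height - 1) 0 (-1)) 0).foldl
    (fun ans p =>
      let i := min (2 * (p.1 + 1)) diag_base
      (PySem.List.pyRange 0 i 1).foldl (fun ans b => ans + min (2 * p.2) (diag_base - b)) ans)
    0

-- ===== PORT B =====
def num_flush_diagonals_last_column_alt (base : Int) (height : Int) : Int :=
  let D := 2 * base - 1
  ((PySem.List.pyRange (height - 1) 0 (-1)).foldl
    (fun st h =>
      let w := min (2 * (st.2 + 1)) D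
      let ans := if 0 < w then
          let k := min (max (D - 2 * h + 1) 0) w
          let m := w - k
          st.1 + (2 * h * k + m * (D - k) - PySem.Int.floordiv (m * (m - 1)) 2)
        else st.1
      (ans, st.2 + 1))
    ((0 : Int), (0 : Int))).1

-- ===== PRECONDITION & SPEC =====
def Spec_num_flush_diagonals_last_column (base : Int) (height : Int) (out : Int) : Prop := out = num_flush_diagonals_last_column_alt base height
instance (base : Int) (height : Int) (out : Int) : Decidable (Spec_num_flush_diagonals_last_column base height out) := by unfold Spec_num_flush_diagonals_last_column; infer_instance

-- ===== CLAIM (what is proved, stated in full; the proofs are below) =====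
def Claim_equal_num_flush_diagonals_last_column : Prop := ∀ (base : Int) (height : Int), Dom_num_flush_diagonals_last_column base height → Spec_num_flush_diagonals_last_column base height (num_flush_diagonals_last_column base height)

-- ===== LEMMAS AND PROOFS =====

-- inner sum as closed form, for a natural-number range bound
theorem inner_nat (D h : Int) : ∀ (n : Nat) (a : Int),
    (PySem.List.pyRange 0 (n : Int) 1).foldl (fun ans b => ans + min (2 * h) (D - b)) a
    = a + (2 * h * (min (max (D - 2 * h + 1) 0) (n : Int))
        + ((n : Int) - min (max (D - 2 * h + 1) 0) (n : Int)) * (D - min (max (D - 2 * h + 1) 0) (n : Int))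
        - (((n : Int) - min (max (D - 2 * h + 1) 0) (n : Int)) * (((n : Int) - min (max (D - 2 * h + 1) 0) (n : Int)) - 1)) / 2) := by
  intro n
  induction n with
  | zero =>
    intro a
    simp [PySem.List.pyRange_one_eq_nil]
  | succ n ih =>
    intro a
    have hsplit : PySem.List.pyRange 0 ((n : Int) + 1) 1
        = PySem.List.pyRange 0 (n : Int) 1 ++ [(n : Int)] :=
      PySem.List.pyRange_one_succ_right (by exact_mod_cast Int.natCast_nonneg n)
    push_cast
    rw [hsplit, List.foldl_append, ih]
    simp only [List.foldl]
    set t := max (D - 2 * h + 1) 0 with ht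
    have ht0 : 0 ≤ t := le_max_right _ _
    by_cases hc : t ≤ (n : Int)
    · -- k stays t, one more flat term D - n
      have hk1 : min t (n : Int) = t := min_eq_left hc
      have hk2 : min t ((n : Int) + 1) = t := min_eq_left (by omega)
      have hmin : min (2 * h) (D - (n : Int)) = D - (n : Int) := by
        have : D - 2 * h + 1 ≤ t := le_max_left _ _
        exact min_eq_right (by omega)
      rw [hk1, hk2, hmin]
      set m := (n : Int) - t with hm
      have hdiv : ((m + 1) * m) / 2 = (m * (m - 1)) / 2 + m := by
        have h1 : (m + 1) * m = m * (m - 1) + m * 2 := by ring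
        rw [h1, Int.add_mul_ediv_right _ _ (by norm_num : (2:Int) ≠ 0)]
      have hrw : ((n : Int) + 1 - t) * (((n : Int) + 1 - t) - 1) = (m + 1) * m := by
        rw [hm]; ring
      rw [hrw, hdiv]
      have : ((n : Int) + 1 - t) * (D - t) = m * (D - t) + (D - t) := by rw [hm]; ring
      rw [this]
      linarith [hm]
    · -- k saturates at the range bound, one more capped term 2h
      have hk1 : min t (n : Int) = (n : Int) := min_eq_right (by omega)
      have hk2 : min t ((n : Int) + 1) = (n : Int) + 1 := min_eq_right (by omega)
      have htpos : t = D - 2 * h + 1 := by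
        rcases max_cases (D - 2 * h + 1) 0 with ⟨he, _⟩ | ⟨he, hle⟩
        · exact he.symm ▸ rfl
        · omega
      have hmin : min (2 * h) (D - (n : Int)) = 2 * h := min_eq_left (by omega)
      rw [hk1, hk2, hmin]
      simp
      ring

-- inner sum as closed form, for an arbitrary integer bound, in B's exact shape
theorem inner_closed (D h w a : Int) :
    (PySem.List.pyRange 0 w 1).foldl (fun ans b => ans + min (2 * h) (D - b)) a
    = if 0 < w then
        a + (2 * h * (min (max (D - 2 * h + 1) 0) w)
          + (w - min (max (D - 2 * h + 1) 0) w) * (D - min (max (D - 2 * h + 1) 0) w)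
          - PySem.Int.floordiv ((w - min (max (D - 2 * h + 1) 0) w) * ((w - min (max (D - 2 * h + 1) 0) w) - 1)) 2)
      else a := by
  by_cases hw : w ≤ 0
  · rw [PySem.List.pyRange_one_eq_nil hw]
    simp [not_lt.mpr hw]
  · push Not at hw
    have hwn : w = ((w.toNat : Nat) : Int) := (Int.toNat_of_nonneg hw.le).symm
    rw [if_pos hw, PySem.Int.floordiv_eq_ediv_of_pos (by norm_num)]
    rw [hwn]
    exact inner_nat D h w.toNat a

-- the outer loops agree: A folds over enumerate, B carries the counter in its state
theorem outer_agree (D : Int) : ∀ (xs : List Int) (s a : Int),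
    (PySem.List.enumerate xs s).foldl
      (fun ans p =>
        let i := min (2 * (p.1 + 1)) D
        (PySem.List.pyRange 0 i 1).foldl (fun ans b => ans + min (2 * p.2) (D - b)) ans) a
    = ((xs.foldl
        (fun st h =>
          let w := min (2 * (st.2 + 1)) D
          let ans := if 0 < w then
              let k := min (max (D - 2 * h + 1) 0) w
              let m := w - k
              st.1 + (2 * h * k + m * (D - k) - PySem.Int.floordiv (m * (m - 1)) 2)
            else st.1
          (ans, st.2 + 1)) (a, s)).1) := by
  intro xs
  induction xs with
  | nil => intro s a; simp [PySem.List.enumerate]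
  | cons x xs ih =>
    intro s a
    rw [PySem.List.enumerate_cons]
    simp only [List.foldl]
    rw [inner_closed D x (min (2 * (s + 1)) D) a, ih]

-- ===== VERDICT (by name: the statement is the Claim_ definition above) =====
theorem num_flush_diagonals_last_column_spec : Claim_equal_num_flush_diagonals_last_column := by
  intro base height _
  unfold Spec_num_flush_diagonals_last_column
  unfold num_flush_diagonals_last_column num_flush_diagonals_last_column_alt
  exact outer_agree (2 * base - 1) (PySem.List.pyRange (height - 1) 0 (-1)) 0 0
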